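-- pv_equiv track=rewrite | github.com/Assembly-WebCrew/assembly-entries-metadata | lib/update-youtube-playlists.py | get_section_youtube_ids
-- ===== SOURCE A (Python) =====
-- def get_section_youtube_ids(section):
--     sorted_entries = sorted(
--         section['entries'],
--         key=lambda x: x.get('position', 999))
--     return map(
--         str,
--         filter(lambda x: x is not None,
--                (entry.get('youtube', None)
--                 for entry in sorted_entries)))
-- ===== SOURCE B (Python) =====
-- def get_section_youtube_ids(section):
--     # One pass: maintain two parallel lists (sorted keys, ids) and do a stable
--     # insertion (scan from the right) for each entry that has a youtube id.
--     keys = []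
--     yts = []
--     for entry in section['entries']:
--         yt = entry.get('youtube', None)
--         if yt is None:
--             continue
--         k = entry.get('position', 999)
--         i = len(keys)
--         while i > 0 and keys[i - 1] > k:
--             i -= 1
--         keys.insert(i, k)
--         yts.insert(i, yt)
--     return map(str, yts)
-- ===== Notes on version B (the rewrite author's own statement) =====
-- stated objective: alternative
-- what changed: B never calls sorted: it makes a single pass over the entries, maintaining two parallel lists (sorted position keys, youtube ids) and placing each entry that has a youtube id by an explicit right-to-left stable insertion scan, instead of A's sort-everything-then-lazily-filter pipeline.
import Mathlib
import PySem

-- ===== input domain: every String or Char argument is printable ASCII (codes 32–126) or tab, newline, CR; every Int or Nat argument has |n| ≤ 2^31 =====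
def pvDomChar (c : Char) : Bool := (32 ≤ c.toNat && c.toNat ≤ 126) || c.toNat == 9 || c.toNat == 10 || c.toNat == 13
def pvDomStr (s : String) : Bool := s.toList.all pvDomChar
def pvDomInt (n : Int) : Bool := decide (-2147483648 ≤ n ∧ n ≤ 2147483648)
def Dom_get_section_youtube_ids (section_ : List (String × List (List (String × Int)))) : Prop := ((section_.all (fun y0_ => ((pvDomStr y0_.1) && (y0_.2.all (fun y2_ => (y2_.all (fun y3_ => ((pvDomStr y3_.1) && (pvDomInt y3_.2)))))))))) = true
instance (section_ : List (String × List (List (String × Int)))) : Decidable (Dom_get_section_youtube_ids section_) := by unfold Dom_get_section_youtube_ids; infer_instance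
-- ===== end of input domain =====

-- B replaces A's sort-all-then-filter pipeline by a single pass with an explicit stable
-- insertion (right-to-left scan) into parallel key/id lists; alternative algorithm, same output.
-- Equivalence is proved on inputs where the 'entries' key exists (otherwise both Pythons raise KeyError).

-- entry.get(k) on an entry dict (entries are association lists per the type convention)
def pvGet (e : List (String × Int)) (k : String) : Option Int := PySem.Dict.get? ⟨e⟩ k
-- entry.get('position', 999), the sort key of both programs
def pvKey (e : List (String × Int)) : Int := PySem.Dict.getD ⟨e⟩ "position" 999

-- ===== PORT A =====
def get_section_youtube_ids (section_ : List (String × List (List (String × Int)))) : List String :=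
  let entries := (PySem.Dict.get? ⟨section_⟩ "entries").getD []   -- Pre_ guarantees the key exists
  let sorted_entries := PySem.List.sorted entries pvKey false
  -- map(str, filter(lambda x: x is not None, (entry.get('youtube', None) for entry in sorted_entries)))
  ((sorted_entries.map (fun entry => pvGet entry "youtube")).filter (fun x => x.isSome)).map
    (fun x => match x with | some v => PySem.Int.toStr v | none => "None")

-- ===== PORT B =====
-- the 'while i > 0 and keys[i-1] > k: i -= 1' loop, recursing on i
-- (keys[i-1] is always in range when 0 < i ≤ len(keys), so getD is exact there)
def pvFindIns (keys : List Int) (k : Int) : Nat → Nat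
  | 0 => 0
  | (i + 1) => if keys.getD i 0 > k then pvFindIns keys k i else i + 1

-- the body of B's single for-loop: skip entries without a youtube id, otherwise
-- insert (key, id) at the scanned position into the parallel lists
def pvStep (st : List Int × List Int) (entry : List (String × Int)) : List Int × List Int :=
  match pvGet entry "youtube" with
  | none => st
  | some yt =>
    let k := pvKey entry
    let i := pvFindIns st.1 k st.1.length
    (PySem.List.insert st.1 (i : Int) k, PySem.List.insert st.2 (i : Int) yt)

def get_section_youtube_ids_alt (section_ : List (String × List (List (String × Int)))) : List String :=
  let entries := (PySem.Dict.get? ⟨section_⟩ "entries").getD []   -- Pre_ guarantees the key exists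
  let st := entries.foldl pvStep ([], [])
  st.2.map PySem.Int.toStr

-- ===== PRECONDITION & SPEC =====
-- Pre_ excludes exactly the dicts without an 'entries' key, where A (section['entries']) raises KeyError.
def Pre_get_section_youtube_ids (section_ : List (String × List (List (String × Int)))) : Prop :=
  (PySem.Dict.get? (⟨section_⟩ : PySem.Dict String (List (List (String × Int)))) "entries").isSome = true
instance (section_ : List (String × List (List (String × Int)))) : Decidable (Pre_get_section_youtube_ids section_) := by unfold Pre_get_section_youtube_ids; infer_instance
def pvWitness_get_section_youtube_ids : (List (String × List (List (String × Int)))) :=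
  [("entries", [[("youtube", 7)], [("position", 1), ("youtube", 3)]])]
def Spec_get_section_youtube_ids (section_ : List (String × List (List (String × Int)))) (out : List String) : Prop := out = get_section_youtube_ids_alt section_
instance (section_ : List (String × List (List (String × Int)))) (out : List String) : Decidable (Spec_get_section_youtube_ids section_ out) := by unfold Spec_get_section_youtube_ids; infer_instance

-- ===== CLAIM (what is proved, stated in full; the proofs are below) =====
def Claim_equal_get_section_youtube_ids : Prop := ∀ (section_ : List (String × List (List (String × Int)))), Dom_get_section_youtube_ids section_ → Pre_get_section_youtube_ids section_ → Spec_get_section_youtube_ids section_ (get_section_youtube_ids section_)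

-- ===== LEMMAS AND PROOFS =====

-- takeWhile/dropWhile as take/drop of the prefix length (small inductions, kept local)
theorem pvTakeWhile_eq_take {α : Type} (p : α → Bool) :
    ∀ l : List α, l.takeWhile p = l.take (l.takeWhile p).length := by
  intro l
  induction l with
  | nil => rfl
  | cons x xs ih =>
    by_cases hx : p x = true <;>
      simp [List.takeWhile_cons, hx, List.take_succ_cons, ← ih]
theorem pvDropWhile_eq_drop {α : Type} (p : α → Bool) :
    ∀ l : List α, l.dropWhile p = l.drop (l.takeWhile p).length := by
  intro l
  induction l with
  | nil => rfl
  | cons x xs ih =>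
    by_cases hx : p x = true <;>
      simp [List.takeWhile_cons, List.dropWhile_cons, hx, ih]
theorem pvLen_takeWhile_le {α : Type} (p : α → Bool) :
    ∀ l : List α, (l.takeWhile p).length ≤ l.length := by
  intro l
  induction l with
  | nil => exact Nat.le_refl _
  | cons x xs ih =>
    by_cases hx : p x = true <;> simp [List.takeWhile_cons, hx]
    · exact ih
theorem pvTakeWhile_concat_neg {α : Type} (p : α → Bool) (a : α) (ha : p a = false) :
    ∀ ks : List α, (ks ++ [a]).takeWhile p = ks.takeWhile p := by
  intro ks
  induction ks with
  | nil => simp [List.takeWhile_cons, ha]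
  | cons x xs ih =>
    by_cases hx : p x = true <;> simp [List.takeWhile_cons, hx, ih]

-- the entries B keeps / A's filter keeps
def pvKept (e : List (String × Int)) : Bool := (pvGet e "youtube").isSome
-- the youtube id of a kept entry
def pvYtv (e : List (String × Int)) : Int := (pvGet e "youtube").getD 0

-- insertBy written as takeWhile/dropWhile around the inserted element
theorem insertBy_eq_take_drop {α : Type} (b : α → α → Bool) (x : α) :
    ∀ ys : List α, PySem.List.insertBy b x ys
      = ys.takeWhile (fun y => !(b x y)) ++ x :: ys.dropWhile (fun y => !(b x y)) := by
  intro ys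
  induction ys with
  | nil => rfl
  | cons y ys ih =>
    by_cases hb : b x y = true
    · simp [PySem.List.insertBy, List.takeWhile_cons, List.dropWhile_cons, hb]
    · simp only [Bool.not_eq_true] at hb
      simp [PySem.List.insertBy, List.takeWhile_cons, List.dropWhile_cons, hb, ih]

-- pvFindIns only looks below i, so a trailing element is invisible for i ≤ length
theorem pvFindIns_append_last (ks : List Int) (a k : Int) :
    ∀ i, i ≤ ks.length → pvFindIns (ks ++ [a]) k i = pvFindIns ks k i := by
  intro i
  induction i with
  | zero => intro _; rfl
  | succ m ih =>
    intro h
    have hm : m < ks.length := Nat.lt_of_succ_le h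
    have hg : (ks ++ [a]).getD m 0 = ks.getD m 0 := by
      simp [List.getD, List.getElem?_append_left hm]
    simp only [pvFindIns, hg]
    split_ifs with hc
    · exact ih (Nat.le_of_lt hm)
    · rfl

-- on a sorted key list, the scan finds exactly the length of the ≤-k prefix
theorem pvFindIns_spec (k : Int) :
    ∀ keys : List Int, keys.Pairwise (· ≤ ·) →
      pvFindIns keys k keys.length = (keys.takeWhile (fun y => !(decide (k < y)))).length := by
  intro keys
  induction keys using List.reverseRecOn with
  | nil => intro _; rfl
  | append_singleton ks a ih =>
    intro hpw
    have hks : ks.Pairwise (· ≤ ·) := hpw.sublist (List.sublist_append_left ks [a])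
    have hall : ∀ y ∈ ks, y ≤ a := by
      intro y hy
      exact (List.pairwise_append.mp hpw).2.2 y hy a (by simp)
    have hlen : (ks ++ [a]).length = ks.length + 1 := by simp
    rw [hlen]
    by_cases hc : k < a
    · -- last element is > k: the scan steps past it and the takeWhile stops before it
      have hg : (ks ++ [a]).getD ks.length 0 = a := by
        simp [List.getD, List.getElem?_concat_length]
      have htw : (ks ++ [a]).takeWhile (fun y => !(decide (k < y)))
          = ks.takeWhile (fun y => !(decide (k < y))) :=
        pvTakeWhile_concat_neg _ a (by simpa using hc) ks
      rw [show pvFindIns (ks ++ [a]) k (ks.length + 1)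
            = if (ks ++ [a]).getD ks.length 0 > k then pvFindIns (ks ++ [a]) k ks.length
              else ks.length + 1 from rfl,
          hg, if_pos hc, pvFindIns_append_last ks a k ks.length (Nat.le_refl _),
          ih hks, htw]
    · -- last element is ≤ k, hence (sorted) everything is: the scan stops at once
      push_neg at hc
      have htw : (ks ++ [a]).takeWhile (fun y => !(decide (k < y))) = ks ++ [a] := by
        apply List.takeWhile_eq_self_iff.mpr
        intro y hy
        rcases List.mem_append.mp hy with h | h
        · simpa using not_lt.mpr (le_trans (hall y h) hc)
        · simp at h; subst h; simpa using not_lt.mpr hc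
      have hg : (ks ++ [a]).getD ks.length 0 = a := by
        simp [List.getD, List.getElem?_concat_length]
      rw [show pvFindIns (ks ++ [a]) k (ks.length + 1)
            = if (ks ++ [a]).getD ks.length 0 > k then pvFindIns (ks ++ [a]) k ks.length
              else ks.length + 1 from rfl,
          hg, if_neg (not_lt.mpr hc), htw]
      simp

-- one kept step of B's loop = one stable insertBy step of the sort, through map pvKey / map pvYtv
theorem pvStep_kept (S : List (List (String × Int))) (e : List (String × Int))
    (hk : pvKept e = true) (hpw : S.Pairwise (fun a b => pvKey a ≤ pvKey b)) :
    pvStep (S.map pvKey, S.map pvYtv) e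
      = ((PySem.List.insertBy (fun a b => decide (pvKey a < pvKey b)) e S).map pvKey,
         (PySem.List.insertBy (fun a b => decide (pvKey a < pvKey b)) e S).map pvYtv) := by
  rcases Option.isSome_iff_exists.mp (by simpa [pvKept] using hk) with ⟨v, hv⟩
  have hkeys : (S.map pvKey).Pairwise (· ≤ ·) := List.pairwise_map.mpr hpw
  set p : List (String × Int) → Bool := fun y => !(decide (pvKey e < pvKey y)) with hp
  set t : Nat := (S.takeWhile p).length with ht
  have htle : t ≤ S.length := pvLen_takeWhile_le p S
  have htke : S.take t = S.takeWhile p := (pvTakeWhile_eq_take p S).symm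
  have hdrp : S.drop t = S.dropWhile p := (pvDropWhile_eq_drop p S).symm
  have hins : PySem.List.insertBy (fun a b => decide (pvKey a < pvKey b)) e S
      = S.takeWhile p ++ e :: S.dropWhile p := insertBy_eq_take_drop _ e S
  have htwmap : (S.map pvKey).takeWhile (fun y => !(decide (pvKey e < y)))
      = (S.takeWhile p).map pvKey := by
    rw [List.takeWhile_map]
    rfl
  have hfind : pvFindIns (S.map pvKey) (pvKey e) (S.map pvKey).length = t := by
    rw [pvFindIns_spec (pvKey e) (S.map pvKey) hkeys, htwmap, List.length_map]
  have hlen1 : (S.map pvKey).length = S.length := List.length_map ..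
  have hlen2 : (S.map pvYtv).length = S.length := List.length_map ..
  simp only [pvStep, hv, hfind]
  rw [PySem.List.insert_natCast _ t _ (by rw [hlen1]; exact htle),
      PySem.List.insert_natCast _ t _ (by rw [hlen2]; exact htle),
      ← List.map_take, ← List.map_take, ← List.map_drop, ← List.map_drop,
      htke, hdrp, hins]
  simp only [List.map_append, List.map_cons]
  rw [show pvYtv e = v from by simp [pvYtv, hv]]

-- B's fold over any entry list produces the key/id projections of the stable sort of the kept entries
theorem pvFold_spec :
    ∀ l : List (List (String × Int)),
      l.foldl pvStep ([], [])
        = ((PySem.List.sorted (l.filter pvKept) pvKey false).map pvKey,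
           (PySem.List.sorted (l.filter pvKept) pvKey false).map pvYtv) := by
  intro l
  induction l using List.reverseRecOn with
  | nil => rfl
  | append_singleton xs x ih =>
    have hstep : ∀ zs : List (List (String × Int)), PySem.List.sorted (zs ++ [x]) pvKey false
        = PySem.List.insertBy (fun a b => decide (pvKey a < pvKey b)) x
            (PySem.List.sorted zs pvKey false) := by
      intro zs
      rw [PySem.List.sorted_eq_foldl_insertBy, PySem.List.sorted_eq_foldl_insertBy,
        List.foldl_append]
      rfl
    rw [List.foldl_append, List.foldl_cons, List.foldl_nil, ih, List.filter_append]
    by_cases hk : pvKept x = true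
    · rw [show List.filter pvKept [x] = [x] by simp [hk], hstep,
        pvStep_kept _ x hk (PySem.List.sorted_pairwise _ _)]
    · rw [show List.filter pvKept [x] = [] by simp at hk; simp [hk], List.append_nil]
      simp only [pvStep, pvGet]
      have : (PySem.Dict.get? (⟨x⟩ : PySem.Dict String Int) "youtube") = none := by
        simpa [pvKept, pvGet, Option.isSome_iff_exists, Option.eq_none_iff_forall_ne_some] using hk
      rw [this]

theorem pvFold_snd (l : List (List (String × Int))) :
    (l.foldl pvStep ([], [])).2
      = (PySem.List.sorted (l.filter pvKept) pvKey false).map pvYtv := by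
  rw [pvFold_spec]

-- stable sort commutes with filtering (used to bring A into B's sorted-filtered form)
theorem insertBy_forall_before {α : Type} (b : α → α → Bool) (x : α) (ys : List α)
    (h : ∀ z ∈ ys, b x z = true) : PySem.List.insertBy b x ys = x :: ys := by
  cases ys with
  | nil => rfl
  | cons y ys => simp [PySem.List.insertBy, h y (by simp)]

theorem filter_insertBy_of_neg {α : Type} (p : α → Bool) (b : α → α → Bool) (x : α)
    (hx : p x = false) : ∀ ys : List α, (PySem.List.insertBy b x ys).filter p = ys.filter p := by
  intro ys
  induction ys with
  | nil => simp [PySem.List.insertBy, hx]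
  | cons y ys ih =>
    by_cases hb : b x y = true
    · simp [PySem.List.insertBy, hb, hx]
    · simp [PySem.List.insertBy, hb, List.filter_cons, ih]

theorem filter_insertBy_of_pos {α κ : Type} [LinearOrder κ] (p : α → Bool) (key : α → κ) (x : α)
    (hx : p x = true) : ∀ ys : List α, ys.Pairwise (fun a b => key a ≤ key b) →
    (PySem.List.insertBy (fun a b => decide (key a < key b)) x ys).filter p
      = PySem.List.insertBy (fun a b => decide (key a < key b)) x (ys.filter p) := by
  intro ys
  induction ys with
  | nil => simp [PySem.List.insertBy, hx]
  | cons y ys ih =>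
    intro hpw
    rcases List.pairwise_cons.mp hpw with ⟨hy, hpw'⟩
    by_cases hb : key x < key y
    · rw [show PySem.List.insertBy (fun a b => decide (key a < key b)) x (y :: ys)
            = x :: y :: ys by simp [PySem.List.insertBy, hb]]
      rw [insertBy_forall_before _ _ _ (by
        intro z hz
        rcases List.mem_filter.mp hz with ⟨hz, _⟩
        rcases List.mem_cons.mp hz with h | h
        · subst h; simpa using hb
        · exact decide_eq_true (lt_of_lt_of_le hb (hy z h)))]
      simp [List.filter_cons, hx]
    · rw [show PySem.List.insertBy (fun a b => decide (key a < key b)) x (y :: ys)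
            = y :: PySem.List.insertBy (fun a b => decide (key a < key b)) x ys by
          simp [PySem.List.insertBy, hb]]
      by_cases hp : p y = true
      · simp only [List.filter_cons, hp, if_true, ih hpw']
        rw [show PySem.List.insertBy (fun a b => decide (key a < key b)) x (y :: ys.filter p)
              = y :: PySem.List.insertBy (fun a b => decide (key a < key b)) x (ys.filter p) by
            simp [PySem.List.insertBy, hb]]
      · simp only [List.filter_cons, ih hpw']
        simp [hp]

theorem filter_sorted {α κ : Type} [LinearOrder κ] (p : α → Bool) (key : α → κ) (xs : List α) :
    (PySem.List.sorted xs key false).filter p = PySem.List.sorted (xs.filter p) key false := by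
  induction xs using List.reverseRecOn with
  | nil => rfl
  | append_singleton xs x ih =>
    have hstep : ∀ zs : List α, PySem.List.sorted (zs ++ [x]) key false
        = PySem.List.insertBy (fun a b => decide (key a < key b)) x (PySem.List.sorted zs key false) := by
      intro zs
      rw [PySem.List.sorted_eq_foldl_insertBy, PySem.List.sorted_eq_foldl_insertBy, List.foldl_append]
      rfl
    rw [hstep, List.filter_append]
    by_cases hp : p x = true
    · rw [filter_insertBy_of_pos p key x hp _ (PySem.List.sorted_pairwise xs key), ih,
        show List.filter p [x] = [x] by simp [hp], hstep]
    · rw [filter_insertBy_of_neg p _ x (by simpa using hp), ih]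
      simp [hp]

-- ===== VERDICT (by name: the statement is the Claim_ definition above) =====
theorem get_section_youtube_ids_spec : Claim_equal_get_section_youtube_ids := by
  intro section_ _ _
  unfold Spec_get_section_youtube_ids get_section_youtube_ids get_section_youtube_ids_alt
  simp only
  rw [pvFold_snd]
  rw [List.filter_map,
    filter_sorted ((fun x : Option Int => x.isSome) ∘ fun entry => pvGet entry "youtube") pvKey]
  rw [show ((fun x : Option Int => x.isSome) ∘ fun entry => pvGet entry "youtube") = pvKept from rfl]
  rw [List.map_map, List.map_map]
  apply List.map_congr_left
  intro e he
  have hp : pvKept e = true := (List.mem_filter.mp ((PySem.List.mem_sorted _ _ _ e).mp he)).2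
  rcases Option.isSome_iff_exists.mp (by simpa [pvKept] using hp) with ⟨v, hv⟩
  simp [Function.comp, pvYtv, hv]
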